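-- pv_equiv track=rewrite | github.com/BenMcAvoy/PBREngine | gen_cube.py | cpp_array_uints
-- ===== SOURCE A (Python) =====
-- from typing import List, Tuple
--
-- def cpp_array_uints(name: str, arr: List[int], per_line: int = 12) -> str:
--     out = []
--     out.append(f"constexpr std::array<unsigned int, {len(arr)}> {name} = {{")
--     line = "    "
--     for i, v in enumerate(arr):
--         line += str(v) + ", "
--         if (i+1) % per_line == 0:
--             out.append(line)
--             line = "    "
--     if line.strip():
--         out.append(line)
--     out.append("};")
--     return "\n".join(out)
-- ===== SOURCE B (Python) =====
-- from typing import List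
--
--
-- def cpp_array_uints(name: str, arr: List[int], per_line: int = 12) -> str:
--     def rows(rest: List[int]) -> List[str]:
--         if not rest:
--             return []
--         return ["    " + "".join(f"{v}, " for v in rest[:per_line])] + rows(rest[per_line:])
--
--     header = f"constexpr std::array<unsigned int, {len(arr)}> {name} = {{"
--     return "\n".join([header] + rows(arr) + ["};"])
-- ===== Notes on version B (the rewrite author's own statement) =====
-- stated objective: alternative
-- what changed: Replaces A's running line accumulator with enumerate index and modulo test by structural recursion that slices the next per_line values off the list and renders each chunk as one row.
-- outside the precondition, e.g. on cpp_array_uints('x', [2], -3): A returns 'constexpr std::array<unsigned int, 1> x = {\n    2, \n};', B raises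
import Mathlib
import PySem

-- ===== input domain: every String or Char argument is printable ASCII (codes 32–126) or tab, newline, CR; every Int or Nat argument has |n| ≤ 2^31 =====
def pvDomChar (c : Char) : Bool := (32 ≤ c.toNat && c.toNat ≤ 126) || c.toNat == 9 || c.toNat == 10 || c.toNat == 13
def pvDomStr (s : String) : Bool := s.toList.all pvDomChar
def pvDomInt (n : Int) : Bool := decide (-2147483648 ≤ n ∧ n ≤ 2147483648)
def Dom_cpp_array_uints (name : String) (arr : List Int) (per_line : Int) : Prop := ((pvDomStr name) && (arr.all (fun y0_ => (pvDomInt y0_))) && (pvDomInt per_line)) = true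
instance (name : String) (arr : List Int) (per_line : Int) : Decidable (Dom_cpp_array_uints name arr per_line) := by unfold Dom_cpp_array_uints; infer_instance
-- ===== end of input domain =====

-- B replaces A's running line accumulator (enumerate index + modulo test) by structural recursion
-- that slices the list into per_line-sized chunks and renders each chunk as one row (objective: alternative).

-- ===== PORT A =====
-- the 'for i, v in enumerate(arr)' loop, carrying (i, line, out); returns (out, line) at loop exit
def pvLoopA (p : Int) : List Int → Int → String → List String → List String × String
  | [], _, line, out => (out, line)
  | v :: vs, i, line, out =>
      if PySem.Int.mod (i + 1) p = 0 then
        pvLoopA p vs (i + 1) "    " (out ++ [line ++ PySem.Int.toStr v ++ ", "])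
      else pvLoopA p vs (i + 1) (line ++ PySem.Int.toStr v ++ ", ") out

-- 'if line.strip(): out.append(line)' — keep the last line iff it strips non-empty
def pvFinal (st : List String × String) : List String :=
  if PySem.Str.strip st.2 ≠ "" then st.1 ++ [st.2] else st.1

def cpp_array_uints (name : String) (arr : List Int) (per_line : Int) : String :=
  PySem.Str.join "\n"
    (pvFinal (pvLoopA per_line arr 0 "    "
        ["constexpr std::array<unsigned int, " ++ PySem.Int.toStr (arr.length : Int) ++ "> " ++ name ++ " = {"])
      ++ ["};"])

-- ===== PORT B =====
-- one row: "    " + "".join(f"{v}, " for v in chunk)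
def pvRow (chunk : List Int) : String :=
  "    " ++ PySem.Str.join "" (chunk.map (fun v => PySem.Int.toStr v ++ ", "))

-- B's recursive 'rows' helper; fuel = arr.length makes it total (enough whenever per_line > 0)
def pvLoopB (p : Int) : Nat → List Int → List String
  | _, [] => []
  | 0, _ :: _ => []
  | fuel + 1, rest@(_ :: _) =>
      pvRow (PySem.List.slice rest none (some p)) :: pvLoopB p fuel (PySem.List.slice rest (some p) none)

def cpp_array_uints_alt (name : String) (arr : List Int) (per_line : Int) : String :=
  PySem.Str.join "\n"
    ((("constexpr std::array<unsigned int, " ++ PySem.Int.toStr (arr.length : Int) ++ "> " ++ name ++ " = {")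
        :: pvLoopB per_line arr.length arr)
      ++ ["};"])

-- ===== PRECONDITION & SPEC =====
-- Pre_ excludes non-positive per_line with non-empty arr: there A raises ZeroDivisionError (per_line = 0)
-- or its grouping comes from Python's negative-divisor modulo, an accident of the implementation, while
-- B's natural chunking loop does not terminate on those inputs.
def Pre_cpp_array_uints (name : String) (arr : List Int) (per_line : Int) : Prop :=
  0 < per_line ∨ arr = []
instance (name : String) (arr : List Int) (per_line : Int) : Decidable (Pre_cpp_array_uints name arr per_line) := by unfold Pre_cpp_array_uints; infer_instance

def pvWitness_cpp_array_uints : String × List Int × Int := ("verts", [1, 2, 3], 2)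

def Spec_cpp_array_uints (name : String) (arr : List Int) (per_line : Int) (out : String) : Prop := out = cpp_array_uints_alt name arr per_line
instance (name : String) (arr : List Int) (per_line : Int) (out : String) : Decidable (Spec_cpp_array_uints name arr per_line out) := by unfold Spec_cpp_array_uints; infer_instance

-- ===== CLAIM (what is proved, stated in full; the proofs are below) =====
def Claim_equal_cpp_array_uints : Prop := ∀ (name : String) (arr : List Int) (per_line : Int), Dom_cpp_array_uints name arr per_line → Pre_cpp_array_uints name arr per_line → Spec_cpp_array_uints name arr per_line (cpp_array_uints name arr per_line)

-- ===== LEMMAS AND PROOFS =====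

-- the row text of a chunk, as B's join builds it
def pvJ (l : List Int) : String :=
  PySem.Str.join "" (l.map (fun v => PySem.Int.toStr v ++ ", "))

theorem pvJ_nil : pvJ [] = "" := by
  rw [← String.toList_inj]
  simp [pvJ, PySem.Str.join, PySem.Chars.join_nil]

theorem pvJ_cons (v : Int) (l : List Int) :
    pvJ (v :: l) = PySem.Int.toStr v ++ ", " ++ pvJ l := by
  rw [← String.toList_inj]
  cases l with
  | nil => simp [pvJ, PySem.Str.join, PySem.Chars.join_singleton, PySem.Chars.join_nil,
      String.toList_append]
  | cons w ws =>
      simp [pvJ, PySem.Str.join, PySem.Chars.join_cons_cons, String.toList_append]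

-- pvR pm r l line out: A's loop re-expressed with a countdown r = free slots on the line minus one
def pvR (pm : Nat) : Nat → List Int → String → List String → List String × String
  | _, [], line, out => (out, line)
  | 0, v :: vs, line, out => pvR pm pm vs "    " (out ++ [line ++ PySem.Int.toStr v ++ ", "])
  | r + 1, v :: vs, line, out => pvR pm r vs (line ++ PySem.Int.toStr v ++ ", ") out

theorem pvLoopA_eq_pvR (p : Int) (hp : 0 < p) :
    ∀ (l : List Int) (i : Int), 0 ≤ i → ∀ (line : String) (out : List String),
      pvLoopA p l i line out = pvR (p - 1).toNat (p - 1 - PySem.Int.mod i p).toNat l line out := by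
  intro l
  induction l with
  | nil => intro i _ line out; rfl
  | cons v vs ih =>
      intro i hi line out
      have hme : ∀ a : Int, PySem.Int.mod a p = a % p := fun a => PySem.Int.mod_eq_emod_of_pos hp
      have h0 : 0 ≤ i % p := Int.emod_nonneg i (by omega)
      have h1 : i % p < p := Int.emod_lt_of_pos i hp
      have hadd : (i + 1) % p = (i % p + 1) % p := by
        conv_lhs => rw [show i + 1 = i % p + 1 + p * (i / p) from by
          conv_lhs => rw [← Int.ediv_add_emod i p]
          ring]
        rw [Int.add_mul_emod_self_left]
      rw [pvLoopA, hme, hme]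
      by_cases hc : (i + 1) % p = 0
      · have hj : i % p = p - 1 := by
          by_contra hne
          rw [hadd, Int.emod_eq_of_lt (by omega) (by omega)] at hc
          omega
        have hr : (p - 1 - i % p).toNat = 0 := by omega
        rw [if_pos hc, hr, pvR, ih (i + 1) (by omega), hme, hc, sub_zero]
      · have hlt : i % p + 1 < p := by
          by_contra hge
          have hjp : i % p + 1 = p := by omega
          rw [hadd, hjp, Int.emod_self] at hc
          exact hc rfl
        have hs : (i + 1) % p = i % p + 1 := by
          rw [hadd, Int.emod_eq_of_lt (by omega) hlt]
        have hr : (p - 1 - i % p).toNat = (p - 1 - (i + 1) % p).toNat + 1 := by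
          rw [hs]; omega
        rw [if_neg hc, hr, pvR, ih (i + 1) (by omega), hme]

theorem pvR_small (pm : Nat) :
    ∀ (l : List Int) (r : Nat), l.length ≤ r → ∀ (line : String) (out : List String),
      pvR pm r l line out = (out, line ++ pvJ l) := by
  intro l
  induction l with
  | nil =>
      intro r _ line out
      cases r <;> rw [pvR, pvJ_nil, String.append_empty]
  | cons v vs ih =>
      intro r hr line out
      cases r with
      | zero => simp at hr
      | succ r' =>
          rw [pvR, ih r' (by simpa using hr), pvJ_cons]
          simp [String.append_assoc]

theorem pvR_step (pm : Nat) :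
    ∀ (l : List Int) (r : Nat), r < l.length → ∀ (line : String) (out : List String),
      pvR pm r l line out =
        pvR pm pm (l.drop (r + 1)) "    " (out ++ [line ++ pvJ (l.take (r + 1))]) := by
  intro l
  induction l with
  | nil => intro r hr; simp at hr
  | cons v vs ih =>
      intro r hr line out
      cases r with
      | zero =>
          rw [pvR]
          simp [pvJ_cons, pvJ_nil, String.append_assoc]
      | succ r' =>
          rw [pvR, ih r' (by simpa using hr)]
          simp [pvJ_cons, List.drop_succ_cons, List.take_succ_cons, String.append_assoc]

-- a string containing a non-whitespace character does not strip to ""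
theorem pvStrip_ne_empty (s : String) (c : Char) (hm : c ∈ s.toList)
    (hc : PySem.Chars.isspace c = false) : PySem.Str.strip s ≠ "" := by
  intro h
  have h2 : PySem.Chars.strip s.toList = [] := by
    rw [← PySem.Str.toList_strip, h]
    rfl
  unfold PySem.Chars.strip PySem.Chars.rstrip PySem.Chars.lstrip at h2
  have h3 := List.reverse_eq_nil_iff.mp h2
  rw [List.dropWhile_eq_nil_iff] at h3
  have hsplit : s.toList =
      List.takeWhile PySem.Chars.isspace s.toList ++ List.dropWhile PySem.Chars.isspace s.toList :=
    (List.takeWhile_append_dropWhile).symm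
  rw [hsplit, List.mem_append] at hm
  rcases hm.symm with h' | h'
  · have := h3 c (List.mem_reverse.mpr h')
    rw [hc] at this
    exact Bool.false_ne_true this
  · have := List.mem_takeWhile_imp h'
    rw [hc] at this
    exact Bool.false_ne_true this

theorem pvRow_strip_ne (v : Int) (vs : List Int) :
    PySem.Str.strip ("    " ++ pvJ (v :: vs)) ≠ "" := by
  apply pvStrip_ne_empty _ ','
  · rw [pvJ_cons]
    simp only [String.toList_append, List.mem_append]
    have : ',' ∈ (", " : String).toList := by decide
    tauto
  · decide

theorem pvStripPad : PySem.Str.strip "    " = "" := by decide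

theorem pvMain (p : Int) (hp : 0 < p) :
    ∀ (fuel : Nat) (l : List Int), l.length ≤ fuel → ∀ (out : List String),
      pvFinal (pvR (p - 1).toNat (p - 1).toNat l "    " out) = out ++ pvLoopB p fuel l := by
  intro fuel
  induction fuel with
  | zero =>
      intro l hl out
      have : l = [] := List.eq_nil_of_length_eq_zero (by omega)
      subst this
      simp [pvR, pvFinal, pvLoopB, pvStripPad]
  | succ f ih =>
      intro l hl out
      cases l with
      | nil => simp [pvR, pvFinal, pvLoopB, pvStripPad]
      | cons v vs =>
          rw [pvLoopB]
          by_cases hsm : (v :: vs).length ≤ (p - 1).toNat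
          · rw [pvR_small _ _ _ hsm]
            have htake : PySem.List.slice (v :: vs) none (some p) = v :: vs := by
              rw [PySem.List.slice_to _ (le_of_lt hp), List.take_of_length_le (by omega)]
            have hdrop : PySem.List.slice (v :: vs) (some p) none = [] := by
              rw [PySem.List.slice_from _ (le_of_lt hp)]
              exact List.drop_eq_nil_of_le (by omega)
            rw [htake, hdrop]
            unfold pvFinal
            rw [if_pos (pvRow_strip_ne v vs)]
            rw [pvLoopB]
            simp [pvRow, pvJ]
          · have hlen : (p - 1).toNat < (v :: vs).length := by omega
            rw [pvR_step _ _ _ hlen]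
            have hnat : (p - 1).toNat + 1 = p.toNat := by omega
            have htake : PySem.List.slice (v :: vs) none (some p) = (v :: vs).take p.toNat :=
              PySem.List.slice_to _ (le_of_lt hp)
            have hdrop : PySem.List.slice (v :: vs) (some p) none = (v :: vs).drop p.toNat :=
              PySem.List.slice_from _ (le_of_lt hp)
            rw [ih _ (by simp only [List.length_drop]; omega) _, htake, hdrop, hnat]
            simp only [List.append_assoc, List.singleton_append]
            congr 2

-- ===== VERDICT (by name: the statement is the Claim_ definition above) =====
theorem cpp_array_uints_spec : Claim_equal_cpp_array_uints := by
  intro name arr per_line _ hpre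
  unfold Spec_cpp_array_uints cpp_array_uints cpp_array_uints_alt
  rcases hpre with hp | hnil
  · rw [pvLoopA_eq_pvR per_line hp arr 0 le_rfl]
    have hmod : PySem.Int.mod 0 per_line = 0 := by
      rw [PySem.Int.mod_eq_emod_of_pos hp]; simp
    rw [hmod, sub_zero]
    rw [pvMain per_line hp arr.length arr le_rfl]
    simp
  · subst hnil
    simp [pvLoopA, pvLoopB, pvFinal, pvStripPad]
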